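-- pv_equiv track=rewrite | github.com/shrreku/study_agent | backend/ingestion/hierarchical_tagger.py | classify_formula_type
-- ===== SOURCE A (Python) =====
-- def classify_formula_type(equation: str) -> str:
--     """Classify the type of mathematical formula.
--
--     Args:
--         equation: LaTeX equation string
--
--     Returns:
--         Formula type: algebraic, differential_equation, integral, etc.
--     """
--     equation_lower = equation.lower()
--
--     # Check for differential equations
--     if '\\frac{d' in equation or '\\partial' in equation or 'frac{\\partial' in equation:
--         return 'differential_equation'
--
--     # Check for integrals
--     if '\\int' in equation:
--         return 'integral'
--
--     # Check for summations
--     if '\\sum' in equation: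
--         return 'summation'
--
--     # Check for limits
--     if '\\lim' in equation:
--         return 'limit'
--
--     # Check for matrix/vector operations
--     if '\\begin{matrix' in equation or '\\begin{bmatrix' in equation:
--         return 'matrix'
--
--     # Check for inequalities
--     if any(ineq in equation for ineq in ['<', '>', '\\leq', '\\geq', '\\neq']):
--         return 'inequality'
--
--     # Default to algebraic
--     return 'algebraic'
-- ===== SOURCE B (Python) =====
-- # Single left-to-right scan: walk down the suffixes of the string; at each suffix
-- # record the minimum-priority keyword that starts there; map that priority to a label.
-- PATTERNS = [
--     ('\\frac{d', 0), ('\\partial', 0), ('frac{\\partial', 0),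
--     ('\\int', 1), ('\\sum', 2), ('\\lim', 3),
--     ('\\begin{matrix', 4), ('\\begin{bmatrix', 4),
--     ('<', 5), ('>', 5), ('\\leq', 5), ('\\geq', 5), ('\\neq', 5),
-- ]
--
-- LABELS = ['differential_equation', 'integral', 'summation', 'limit',
--           'matrix', 'inequality']
--
--
-- def classify_formula_type(equation: str) -> str:
--     best = 6
--     suffix = equation
--     while suffix:
--         for pat, pri in PATTERNS:
--             if pri < best and suffix.startswith(pat):
--                 best = pri
--         suffix = suffix[1:]
--     return 'algebraic' if best == 6 else LABELS[best]
-- ===== Notes on version B (the rewrite author's own statement) =====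
-- stated objective: alternative
-- what changed: Instead of A's sequence of whole-string substring tests (one per keyword group), B makes one left-to-right scan over the string positions, checking at each position which keyword patterns start there and keeping the minimum priority matched, then maps that priority to its label.
import Mathlib
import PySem

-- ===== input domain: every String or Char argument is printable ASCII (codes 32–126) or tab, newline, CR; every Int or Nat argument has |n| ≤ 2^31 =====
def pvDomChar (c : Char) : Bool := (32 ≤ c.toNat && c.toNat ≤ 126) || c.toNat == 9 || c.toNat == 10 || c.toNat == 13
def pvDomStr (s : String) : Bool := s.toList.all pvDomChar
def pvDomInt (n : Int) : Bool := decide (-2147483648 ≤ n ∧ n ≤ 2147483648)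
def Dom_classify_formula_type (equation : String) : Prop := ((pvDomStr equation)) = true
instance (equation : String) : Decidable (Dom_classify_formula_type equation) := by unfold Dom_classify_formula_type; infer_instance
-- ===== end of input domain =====

-- B replaces A's sequential whole-string substring tests by ONE left-to-right scan of the
-- string that, at each position, records the minimum-priority keyword starting there
-- (same cost class; a different traversal: positions outer, keywords inner).

-- ===== PORT A =====
def classify_formula_type (equation : String) : String :=
  let _equation_lower := PySem.Str.lower equation  -- computed but unused in A
  if PySem.Str.isIn "\\frac{d" equation || PySem.Str.isIn "\\partial" equation
      || PySem.Str.isIn "frac{\\partial" equation then "differential_equation"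
  else if PySem.Str.isIn "\\int" equation then "integral"
  else if PySem.Str.isIn "\\sum" equation then "summation"
  else if PySem.Str.isIn "\\lim" equation then "limit"
  else if PySem.Str.isIn "\\begin{matrix" equation || PySem.Str.isIn "\\begin{bmatrix" equation then "matrix"
  else if ["<", ">", "\\leq", "\\geq", "\\neq"].any (fun ineq => PySem.Str.isIn ineq equation) then "inequality"
  else "algebraic"

-- ===== PORT B =====
def pvPatterns : List (List Char × Nat) :=
  [ ("\\frac{d".toList, 0), ("\\partial".toList, 0), ("frac{\\partial".toList, 0)
  , ("\\int".toList, 1), ("\\sum".toList, 2), ("\\lim".toList, 3)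
  , ("\\begin{matrix".toList, 4), ("\\begin{bmatrix".toList, 4)
  , ("<".toList, 5), (">".toList, 5), ("\\leq".toList, 5), ("\\geq".toList, 5), ("\\neq".toList, 5) ]

def pvLabels : List String :=
  ["differential_equation", "integral", "summation", "limit", "matrix", "inequality"]

-- inner loop of Source B: try every pattern at the current position (suffix t)
def pvInner (t : List Char) (b : Nat) : Nat :=
  pvPatterns.foldl (fun b pp => if pp.2 < b ∧ pp.1.isPrefixOf t then pp.2 else b) b

-- outer loop of Source B: `while suffix: ...; suffix = suffix[1:]`
def pvScan : List Char → Nat → Nat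
  | [], b => b
  | c :: rest, b => pvScan rest (pvInner (c :: rest) b)

def classify_formula_type_alt (equation : String) : String :=
  let best := pvScan equation.toList 6
  if best = 6 then "algebraic" else pvLabels.getD best ""

-- ===== PRECONDITION & SPEC =====
def Spec_classify_formula_type (equation : String) (out : String) : Prop := out = classify_formula_type_alt equation
instance (equation : String) (out : String) : Decidable (Spec_classify_formula_type equation out) := by unfold Spec_classify_formula_type; infer_instance

-- ===== CLAIM (what is proved, stated in full; the proofs are below) =====
def Claim_equal_classify_formula_type : Prop := ∀ (equation : String), Dom_classify_formula_type equation → Spec_classify_formula_type equation (classify_formula_type equation)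

-- ===== LEMMAS AND PROOFS =====

lemma pv_inner_le_init (t : List Char) (ps : List (List Char × Nat)) (b : Nat) :
    ps.foldl (fun b pp => if pp.2 < b ∧ pp.1.isPrefixOf t then pp.2 else b) b ≤ b := by
  induction ps generalizing b with
  | nil => simp
  | cons pp rest ih =>
      simp only [List.foldl_cons]
      refine le_trans (ih _) ?_
      split <;> omega

lemma pv_inner_le (t pat : List Char) (pri : Nat) (ps : List (List Char × Nat)) (b : Nat)
    (hm : (pat, pri) ∈ ps) (hp : pat.isPrefixOf t = true) :
    ps.foldl (fun b pp => if pp.2 < b ∧ pp.1.isPrefixOf t then pp.2 else b) b ≤ pri := by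
  induction ps generalizing b with
  | nil => cases hm
  | cons pp rest ih =>
      simp only [List.foldl_cons]
      rcases List.mem_cons.mp hm with h | h
      · rw [← h]
        refine le_trans (pv_inner_le_init _ _ _) ?_
        simp only [hp, and_true]
        split <;> omega
      · exact ih _ h

lemma pv_inner_cases (t : List Char) (ps : List (List Char × Nat)) (b : Nat) :
    ps.foldl (fun b pp => if pp.2 < b ∧ pp.1.isPrefixOf t then pp.2 else b) b = b ∨
      ∃ pp ∈ ps, pp.1.isPrefixOf t = true ∧
        ps.foldl (fun b pp => if pp.2 < b ∧ pp.1.isPrefixOf t then pp.2 else b) b = pp.2 := by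
  induction ps generalizing b with
  | nil => exact Or.inl rfl
  | cons pp rest ih =>
      simp only [List.foldl_cons]
      rcases ih (if pp.2 < b ∧ pp.1.isPrefixOf t then pp.2 else b) with h | ⟨q, hq, hqp, hqe⟩
      · by_cases hc : pp.2 < b ∧ pp.1.isPrefixOf t
        · rw [if_pos hc] at h ⊢
          exact Or.inr ⟨pp, List.mem_cons_self, hc.2, h⟩
        · rw [if_neg hc] at h ⊢
          exact Or.inl h
      · exact Or.inr ⟨q, List.mem_cons_of_mem _ hq, hqp, hqe⟩

lemma pv_pvInner_le_init (t : List Char) (b : Nat) : pvInner t b ≤ b := by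
  unfold pvInner; exact pv_inner_le_init _ _ _

lemma pv_scan_le_init (t : List Char) (b : Nat) : pvScan t b ≤ b := by
  induction t generalizing b with
  | nil => simp [pvScan]
  | cons c rest ih =>
      exact le_trans (ih _) (pv_pvInner_le_init _ _)

lemma pv_scan_le (t pat : List Char) (pri : Nat) (b i : Nat)
    (hm : (pat, pri) ∈ pvPatterns) (hi : i < t.length) (hp : pat.isPrefixOf (t.drop i) = true) :
    pvScan t b ≤ pri := by
  induction t generalizing b i with
  | nil => simp at hi
  | cons c rest ih =>
      cases i with
      | zero =>
          simp only [List.drop_zero] at hp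
          rw [pvScan]
          refine le_trans (pv_scan_le_init _ _) ?_
          unfold pvInner
          exact pv_inner_le _ _ _ _ _ hm hp
      | succ j =>
          simp only [List.length_cons] at hi
          exact ih _ j (by omega) (by simpa using hp)

lemma pv_scan_cases (t : List Char) (b : Nat) :
    pvScan t b = b ∨ ∃ i, i < t.length ∧ ∃ pp ∈ pvPatterns,
      pp.1.isPrefixOf (t.drop i) = true ∧ pvScan t b = pp.2 := by
  induction t generalizing b with
  | nil => exact Or.inl rfl
  | cons c rest ih =>
      rcases ih (pvInner (c :: rest) b) with h | ⟨i, hi, q, hq, hqp, hqe⟩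
      · rcases pv_inner_cases (c :: rest) pvPatterns b with h2 | ⟨q, hq, hqp, hqe⟩
        · exact Or.inl (by rw [pvScan, h]; exact h2)
        · exact Or.inr ⟨0, by simp, q, hq, by simpa using hqp, by rw [pvScan, h]; exact hqe⟩
      · exact Or.inr ⟨i + 1, by simpa using hi, q, hq, by simpa using hqp, hqe⟩

-- substring occurrence ↔ some in-range position where the (nonempty) pattern starts
lemma pv_isIn_iff (cs pat : List Char) (hne : pat ≠ []) :
    PySem.Chars.isIn pat cs = true ↔
      ∃ i, i < cs.length ∧ pat.isPrefixOf (cs.drop i) = true := by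
  rw [← PySem.Chars.exists_prefix_drop_iff_isIn]
  constructor
  · rintro ⟨j, hj⟩
    by_cases hlt : j < cs.length
    · exact ⟨j, hlt, List.isPrefixOf_iff_prefix.mpr hj⟩
    · exfalso
      rw [List.drop_eq_nil_of_le (by omega)] at hj
      exact hne (List.prefix_nil.mp hj)
  · rintro ⟨i, _, hp⟩
    exact ⟨i, List.isPrefixOf_iff_prefix.mp hp⟩

lemma pv_best_le (cs pat : List Char) (pri : Nat) (hm : (pat, pri) ∈ pvPatterns)
    (hne : pat ≠ []) (hin : PySem.Chars.isIn pat cs = true) : pvScan cs 6 ≤ pri := by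
  obtain ⟨i, hi, hp⟩ := (pv_isIn_iff cs pat hne).mp hin
  exact pv_scan_le cs pat pri 6 i hm hi hp

lemma pv_best_cases (cs : List Char) :
    pvScan cs 6 = 6 ∨ ∃ pp ∈ pvPatterns,
      PySem.Chars.isIn pp.1 cs = true ∧ pvScan cs 6 = pp.2 := by
  rcases pv_scan_cases cs 6 with h | ⟨i, hi, q, hq, hqp, hqe⟩
  · exact Or.inl h
  · refine Or.inr ⟨q, hq, ?_, hqe⟩
    have hne : q.1 ≠ [] := by fin_cases hq <;> simp
    exact (pv_isIn_iff cs q.1 hne).mpr ⟨i, hi, hqp⟩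

lemma pv_alt_eq (equation : String) (k : Nat) (h : pvScan equation.toList 6 = k) :
    classify_formula_type_alt equation = if k = 6 then "algebraic" else pvLabels.getD k "" := by
  simp [classify_formula_type_alt, h]

-- ===== VERDICT (by name: the statement is the Claim_ definition above) =====
theorem classify_formula_type_spec : Claim_equal_classify_formula_type := by
  intro equation _
  unfold Spec_classify_formula_type classify_formula_type
  split_ifs with h1 h2 h3 h4 h5 h6
  · -- differential_equation : best = 0
    simp only [Bool.or_eq_true] at h1
    have hb : pvScan equation.toList 6 ≤ 0 := by
      rcases h1 with (h | h) | h
      · exact pv_best_le _ "\\frac{d".toList 0 (by simp [pvPatterns]) (by decide) (by simpa using h)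
      · exact pv_best_le _ "\\partial".toList 0 (by simp [pvPatterns]) (by decide) (by simpa using h)
      · exact pv_best_le _ "frac{\\partial".toList 0 (by simp [pvPatterns]) (by decide) (by simpa using h)
    rw [pv_alt_eq equation 0 (Nat.le_zero.mp hb)]
    simp [pvLabels]
  · -- integral : best = 1
    have hb : pvScan equation.toList 6 ≤ 1 :=
      pv_best_le _ "\\int".toList 1 (by simp [pvPatterns]) (by decide) (by simpa using h2)
    have hbv : pvScan equation.toList 6 = 1 := by
      rcases pv_best_cases equation.toList with h | ⟨q, hq, hin, he⟩
      · omega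
      · fin_cases hq <;> simp_all
    rw [pv_alt_eq equation 1 hbv]; simp [pvLabels]
  · -- summation : best = 2
    have hb : pvScan equation.toList 6 ≤ 2 :=
      pv_best_le _ "\\sum".toList 2 (by simp [pvPatterns]) (by decide) (by simpa using h3)
    have hbv : pvScan equation.toList 6 = 2 := by
      rcases pv_best_cases equation.toList with h | ⟨q, hq, hin, he⟩
      · omega
      · fin_cases hq <;> simp_all
    rw [pv_alt_eq equation 2 hbv]; simp [pvLabels]
  · -- limit : best = 3
    have hb : pvScan equation.toList 6 ≤ 3 :=
      pv_best_le _ "\\lim".toList 3 (by simp [pvPatterns]) (by decide) (by simpa using h4)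
    have hbv : pvScan equation.toList 6 = 3 := by
      rcases pv_best_cases equation.toList with h | ⟨q, hq, hin, he⟩
      · omega
      · fin_cases hq <;> simp_all
    rw [pv_alt_eq equation 3 hbv]; simp [pvLabels]
  · -- matrix : best = 4
    simp only [Bool.or_eq_true] at h5
    have hb : pvScan equation.toList 6 ≤ 4 := by
      rcases h5 with h | h
      · exact pv_best_le _ "\\begin{matrix".toList 4 (by simp [pvPatterns]) (by decide) (by simpa using h)
      · exact pv_best_le _ "\\begin{bmatrix".toList 4 (by simp [pvPatterns]) (by decide) (by simpa using h)
    have hbv : pvScan equation.toList 6 = 4 := by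
      rcases pv_best_cases equation.toList with h | ⟨q, hq, hin, he⟩
      · omega
      · fin_cases hq <;> simp_all
    rw [pv_alt_eq equation 4 hbv]; simp [pvLabels]
  · -- inequality : best = 5
    simp only [List.any_cons, List.any_nil, Bool.or_eq_true, Bool.or_false] at h6
    have hb : pvScan equation.toList 6 ≤ 5 := by
      rcases h6 with h | h | h | h | h
      · exact pv_best_le _ "<".toList 5 (by simp [pvPatterns]) (by decide) (by simpa using h)
      · exact pv_best_le _ ">".toList 5 (by simp [pvPatterns]) (by decide) (by simpa using h)
      · exact pv_best_le _ "\\leq".toList 5 (by simp [pvPatterns]) (by decide) (by simpa using h)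
      · exact pv_best_le _ "\\geq".toList 5 (by simp [pvPatterns]) (by decide) (by simpa using h)
      · exact pv_best_le _ "\\neq".toList 5 (by simp [pvPatterns]) (by decide) (by simpa using h)
    have hbv : pvScan equation.toList 6 = 5 := by
      rcases pv_best_cases equation.toList with h | ⟨q, hq, hin, he⟩
      · omega
      · fin_cases hq <;> simp_all
    rw [pv_alt_eq equation 5 hbv]; simp [pvLabels]
  · -- algebraic : best = 6
    have hbv : pvScan equation.toList 6 = 6 := by
      rcases pv_best_cases equation.toList with h | ⟨q, hq, hin, he⟩
      · exact h
      · fin_cases hq <;> simp_all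
    rw [pv_alt_eq equation 6 hbv]; simp
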